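-- pv_equiv track=rewrite | github.com/gaboza12/we-are-algorithm | 724thomas/Week4 Tree/2233.py | solution
-- ===== SOURCE A (Python) =====
-- from collections import defaultdict
--
-- def solution(n, binary, rot):
--     def make_edges(s):
--         stack = [0]
--         rot_node = set()
--         c = 0
--         for i in range(len(s)):
--             if i in rot:
--                 rot_node.add(c)
--             if s[i] == "0":
--                 c += 1
--                 stack.append(c)
--                 in_out[c][0] = i + 1
--             else:
--                 val = stack.pop()
--                 children[stack[-1]].append(val)
--                 in_out[val][1] = i + 1
--         return rot_node
--
--     def dfs(node):
--         count = 1 if node in rot_node else 0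
--
--         for child in children[node]:
--             count += dfs(child)
--
--         if count == 2:
--             ans[0] = node
--             return False
--         elif count == 1:
--             return True
--         else:
--             return False
--
--     ans = [0]
--     children = defaultdict(list)
--     in_out = [[0, 0] for _ in range(n + 1)]
--     rot_node = make_edges(binary)
--
--     if len(rot_node) == 1:
--         return in_out[list(rot_node)[0]]
--     dfs(0)
--     return in_out[ans[0]]
-- ===== SOURCE B (Python) =====
-- def solution(n, binary, rot):
--     # Same parse as the original; the recursive dfs is replaced by an
--     # iterative post-order traversal with an explicit frame stack.
--     children = {}
--     in_out = [[0, 0] for _ in range(n + 1)]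
--     rot_node = set()
--     stack = [0]
--     c = 0
--     for i in range(len(binary)):
--         if i in rot:
--             rot_node.add(c)
--         if binary[i] == "0":
--             c += 1
--             stack.append(c)
--             in_out[c][0] = i + 1
--         else:
--             v = stack.pop()
--             children.setdefault(stack[-1], []).append(v)
--             in_out[v][1] = i + 1
--     if len(rot_node) == 1:
--         return in_out[next(iter(rot_node))]
--     ans = 0
--     todo = [(0, children.get(0, []), 1 if 0 in rot_node else 0)]
--     while todo:
--         node, rem, cnt = todo.pop()
--         if rem:
--             child = rem[0]
--             todo.append((node, rem[1:], cnt))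
--             todo.append((child, children.get(child, []), 1 if child in rot_node else 0))
--         else:
--             r = 1 if cnt == 1 else 0
--             if cnt == 2:
--                 ans = node
--             if todo:
--                 pn, prem, pcnt = todo.pop()
--                 todo.append((pn, prem, pcnt + r))
--     return in_out[ans]
-- ===== Notes on version B (the rewrite author's own statement) =====
-- stated objective: alternative
-- what changed: The recursive dfs is replaced by an iterative post-order traversal driven by an explicit stack of (node, remaining-children, count) frames that passes each subtree's 0/1 result up to the parent frame; the parse of `binary` is kept.
import Mathlib
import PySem

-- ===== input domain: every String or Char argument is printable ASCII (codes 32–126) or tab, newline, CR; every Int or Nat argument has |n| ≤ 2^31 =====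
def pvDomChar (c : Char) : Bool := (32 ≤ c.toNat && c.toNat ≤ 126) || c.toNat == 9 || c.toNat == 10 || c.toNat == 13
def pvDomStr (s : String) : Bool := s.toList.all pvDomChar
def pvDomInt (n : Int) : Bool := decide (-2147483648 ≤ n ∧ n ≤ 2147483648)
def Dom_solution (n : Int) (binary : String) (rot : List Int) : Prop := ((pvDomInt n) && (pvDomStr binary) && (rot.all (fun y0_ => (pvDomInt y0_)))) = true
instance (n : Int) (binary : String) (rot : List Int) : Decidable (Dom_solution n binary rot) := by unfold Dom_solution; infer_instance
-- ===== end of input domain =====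

-- B replaces A's recursive dfs by an iterative post-order traversal with an
-- explicit frame stack (same parse of `binary`, same return value; A's Python
-- also mutates nothing observable — equality here is about the return value).

-- ===== PORT A =====
-- Both Pythons parse `binary` with the character-identical loop (B's Python
-- copies A's make_edges loop verbatim up to dict flavour), so the parse is one
-- shared helper; the traversals that follow it are ported separately below.

/-- parse state: stack (head = top), c, rot_node (a PySem.Set), in_out, children -/
structure PvSt where
  stack : List Int
  c : Int
  rotN : PySem.Set Int
  inout : List (Int × Int)
  ch : PySem.Dict Int (List Int)

/-- `children[p].append v` on a defaultdict(list) -/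
def pvAddChild (d : PySem.Dict Int (List Int)) (p v : Int) : PySem.Dict Int (List Int) :=
  d.insert p (d.getD p [] ++ [v])

/-- the `for i in range(len(s))` loop of make_edges; `none` = IndexError/pop on
    empty/stack[-1] on empty (excluded by Pre_solution). -/
def pvParse (rot : List Int) : List Char → Int → PvSt → Option PvSt
  | [], _, st => some st
  | chr :: rest, i, st =>
    let rotN := if rot.contains i then PySem.Set.add st.rotN st.c else st.rotN
    if chr == '0' then
      let c' := st.c + 1
      match PySem.List.pySet? st.inout c' (i + 1, (PySem.List.pyGetD st.inout c' (0, 0)).2) with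
      | none => none                    -- in_out[c] : IndexError
      | some io => pvParse rot rest (i + 1) ⟨c' :: st.stack, c', rotN, io, st.ch⟩
    else
      match st.stack with
      | v :: p :: s' =>
        match PySem.List.pySet? st.inout v ((PySem.List.pyGetD st.inout v (0, 0)).1, i + 1) with
        | none => none                  -- in_out[val] : IndexError
        | some io => pvParse rot rest (i + 1) ⟨p :: s', st.c, rotN, io, pvAddChild st.ch p v⟩
      | _ => none                       -- stack.pop() / stack[-1] : IndexError

/-- `return in_out[x]` (a two-element Python list). -/
def pvOutAt (io : List (Int × Int)) (x : Int) : List Int :=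
  match PySem.List.pyGet? io x with
  | some p => [p.1, p.2]
  | none => []

mutual
/-- A's dfs(node); fuel is only a totality guard (one unit per child call),
    threaded through exactly as consumed; returns (fuel', ans', return value). -/
def pvDfsA (ch : PySem.Dict Int (List Int)) (rotN : PySem.Set Int) (fuel : Nat)
    (node ans : Int) : Option (Nat × Int × Int) :=
  match pvDfsChA ch rotN fuel (ch.getD node []) ans
      (if PySem.Set.contains rotN node then 1 else 0) with
  | none => none
  | some (f', a', cnt) =>
      if cnt == 2 then some (f', node, 0)
      else if cnt == 1 then some (f', a', 1)
      else some (f', a', 0)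
termination_by (fuel, 1, 0)

/-- A's `for child in children[node]: count += dfs(child)`.  `min f' f` only
    re-states the (true) fact that a call cannot return more fuel than it got,
    so that termination is structural. -/
def pvDfsChA (ch : PySem.Dict Int (List Int)) (rotN : PySem.Set Int) (fuel : Nat)
    (cs : List Int) (ans cnt : Int) : Option (Nat × Int × Int) :=
  match cs with
  | [] => some (fuel, ans, cnt)
  | c :: rest =>
    match fuel with
    | 0 => none
    | f + 1 =>
      match pvDfsA ch rotN f c ans with
      | none => none
      | some (f', a', r) => pvDfsChA ch rotN (min f' f) rest a' (cnt + r)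
termination_by (fuel, 0, cs.length)
end

def solution (n : Int) (binary : String) (rot : List Int) : List Int :=
  match pvParse rot binary.toList 0
      ⟨[0], 0, PySem.Set.empty, List.replicate (n + 1).toNat (0, 0), PySem.Dict.empty⟩ with
  | none => []
  | some st =>
    if st.rotN.length == 1 then pvOutAt st.inout (st.rotN.headD 0)
    else
      match pvDfsA st.ch st.rotN (binary.toList.length + 2) 0 0 with
      | none => []
      | some (_, a, _) => pvOutAt st.inout a

-- ===== PORT B =====

/-- B's while loop over the explicit frame stack `todo` (head = top); a frame is
    (node, remaining children, count so far).  Fuel (a totality guard) is spent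
    once per child-frame push. -/
def pvLoopB (ch : PySem.Dict Int (List Int)) (rotN : PySem.Set Int) :
    Nat → List (Int × List Int × Int) → Int → Option Int
  | _, [], ans => some ans
  | fuel, (node, c :: remRest, cnt) :: rest, ans =>
    match fuel with
    | 0 => none
    | f + 1 =>
      pvLoopB ch rotN f
        ((c, ch.getD c [], if PySem.Set.contains rotN c then 1 else 0)
          :: (node, remRest, cnt) :: rest) ans
  | fuel, (node, [], cnt) :: rest, ans =>
    let r : Int := if cnt == 1 then 1 else 0
    let ans' := if cnt == 2 then node else ans
    match rest with
    | [] => some ans'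
    | (pn, prem, pcnt) :: rs => pvLoopB ch rotN fuel ((pn, prem, pcnt + r) :: rs) ans'
termination_by fuel todo _ => (fuel, todo.length)

def solution_alt (n : Int) (binary : String) (rot : List Int) : List Int :=
  match pvParse rot binary.toList 0
      ⟨[0], 0, PySem.Set.empty, List.replicate (n + 1).toNat (0, 0), PySem.Dict.empty⟩ with
  | none => []
  | some st =>
    if st.rotN.length == 1 then pvOutAt st.inout (st.rotN.headD 0)
    else
      match pvLoopB st.ch st.rotN (binary.toList.length + 2)
          [(0, st.ch.getD 0 [], if PySem.Set.contains st.rotN 0 then 1 else 0)] 0 with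
      | none => []
      | some a => pvOutAt st.inout a

-- ===== PRECONDITION & SPEC =====
-- Pre_solution = exactly the inputs where the Python A returns (no IndexError
-- from in_out / stack.pop / stack[-1]): n ≥ 0, at most n '0'-characters, and
-- before every non-'0' character the stack holds at least two entries.
def Pre_solution (n : Int) (binary : String) (rot : List Int) : Prop :=
  0 ≤ n ∧ ((binary.toList.count '0' : Int) ≤ n) ∧
    ∀ i ∈ List.range binary.toList.length,
      binary.toList[i]? = some '0' ∨ i + 1 ≤ 2 * (binary.toList.take i).count '0'
instance (n : Int) (binary : String) (rot : List Int) : Decidable (Pre_solution n binary rot) := by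
  unfold Pre_solution; infer_instance

def pvWitness_solution : Int × String × List Int := (2, "0101", [0, 2])

def Spec_solution (n : Int) (binary : String) (rot : List Int) (out : List Int) : Prop := out = solution_alt n binary rot
instance (n : Int) (binary : String) (rot : List Int) (out : List Int) : Decidable (Spec_solution n binary rot out) := by unfold Spec_solution; infer_instance

-- ===== CLAIM (what is proved, stated in full; the proofs are below) =====
def Claim_equal_solution : Prop := ∀ (n : Int) (binary : String) (rot : List Int), Dom_solution n binary rot → Pre_solution n binary rot → Spec_solution n binary rot (solution n binary rot)

-- ===== LEMMAS AND PROOFS =====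

/-- a child loop never returns more fuel than it was given. -/
lemma pvDfsChA_fuel_le (ch : PySem.Dict Int (List Int)) (rotN : PySem.Set Int) :
    ∀ f cs ans cnt f' a' c', pvDfsChA ch rotN f cs ans cnt = some (f', a', c') → f' ≤ f := by
  intro f
  induction f using Nat.strong_induction_on with
  | _ f ih =>
    intro cs ans cnt f' a' c' h
    match cs with
    | [] => simp [pvDfsChA] at h; omega
    | c :: rest =>
      match f with
      | 0 => simp [pvDfsChA] at h
      | g + 1 =>
        rw [pvDfsChA] at h
        cases hA : pvDfsA ch rotN g c ans with
        | none => rw [hA] at h; simp at h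
        | some t =>
          obtain ⟨f1, a1, r1⟩ := t
          rw [hA] at h; simp at h
          have := ih (min f1 g) (by omega) rest a1 (cnt + r1) f' a' c' h
          omega

/-- the bridge: B's frame-stack loop computes exactly A's recursion. -/
lemma pvBridge (ch : PySem.Dict Int (List Int)) (rotN : PySem.Set Int) :
    ∀ f rem node cnt rest ans,
      pvLoopB ch rotN f ((node, rem, cnt) :: rest) ans =
        match pvDfsChA ch rotN f rem ans cnt with
        | none => none
        | some (f', a', cnt') =>
          let r : Int := if cnt' == 1 then 1 else 0
          let ans' := if cnt' == 2 then node else a'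
          match rest with
          | [] => some ans'
          | (pn, prem, pcnt) :: rs => pvLoopB ch rotN f' ((pn, prem, pcnt + r) :: rs) ans' := by
  intro f
  induction f using Nat.strong_induction_on with
  | _ f ih =>
    intro rem node cnt rest ans
    match rem with
    | [] =>
      simp only [pvDfsChA]
      match rest with
      | [] => simp [pvLoopB]
      | (pn, prem, pcnt) :: rs => simp [pvLoopB]
    | c :: rem' =>
      match f with
      | 0 => simp [pvLoopB, pvDfsChA]
      | g + 1 =>
        rw [pvLoopB, pvDfsChA]
        rw [ih g (by omega)]
        rw [pvDfsA]
        cases hA : pvDfsChA ch rotN g (ch.getD c []) ans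
            (if PySem.Set.contains rotN c then 1 else 0) with
        | none => simp
        | some t =>
          obtain ⟨f1, a1, c1⟩ := t
          have hle : f1 ≤ g := pvDfsChA_fuel_le ch rotN g _ _ _ _ _ _ hA
          have hmin : min f1 g = f1 := by omega
          simp only
          rw [ih f1 (by omega)]
          by_cases h2 : c1 = 2
          · subst h2; simp [hmin]
          · by_cases h1 : c1 = 1
            · subst h1; simp [hmin]
            · have e2 : (c1 == 2) = false := by simp [h2]
              have e1 : (c1 == 1) = false := by simp [h1]
              simp [e1, e2, hmin]

-- ===== VERDICT (by name: the statement is the Claim_ definition above) =====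
theorem solution_spec : Claim_equal_solution := by
  intro n binary rot _hdom _hpre
  unfold Spec_solution solution solution_alt
  cases hp : pvParse rot binary.toList 0
      ⟨[0], 0, PySem.Set.empty, List.replicate (n + 1).toNat (0, 0), PySem.Dict.empty⟩ with
  | none => rfl
  | some st =>
    simp only
    by_cases h1 : (st.rotN.length == 1) = true
    · simp [h1]
    · simp only [h1, if_false, Bool.false_eq_true]
      rw [pvBridge, pvDfsA]
      cases hc : pvDfsChA st.ch st.rotN (binary.toList.length + 2) (st.ch.getD 0 [])
          0 (if PySem.Set.contains st.rotN 0 then 1 else 0) with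
      | none => rfl
      | some t =>
        obtain ⟨f1, a1, c1⟩ := t
        by_cases h2 : c1 = 2
        · subst h2; simp
        · by_cases hone : c1 = 1
          · subst hone; simp
          · have e2 : (c1 == 2) = false := by simp [h2]
            have e1 : (c1 == 1) = false := by simp [hone]
            simp [e1, e2]
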